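-- pv_equiv track=rewrite | github.com/anders-ahsman/advent-of-code | 2020/day06/main.py | part1
-- ===== SOURCE A (Python) =====
-- def part1(lines):
--     groups = []
--     answers = set()
--     for line in lines:
--         if len(line) > 0:
--             for ch in line:
--                 answers.add(ch)
--         else:
--             groups.append(answers)
--             answers = set()
--     groups.append(answers)
--
--     anyone_yes_sum = sum(len(group) for group in groups)
--     return anyone_yes_sum
-- ===== SOURCE B (Python) =====
-- def part1(lines):
--     if not lines:
--         return 0
--     i = 0
--     while i < len(lines) and len(lines[i]) > 0:
--         i += 1
--     return len(set(''.join(lines[:i]))) + part1(lines[i + 1:])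
-- ===== Notes on version B (the rewrite author's own statement) =====
-- stated objective: idiomatic
-- what changed: Replaces A's flush-on-blank accumulator (a mutable set flushed into a groups list, with a trailing append) by explicit run segmentation: take the maximal leading run of nonempty lines, count the distinct characters of its concatenation, and recurse past the blank line.
import Mathlib
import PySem

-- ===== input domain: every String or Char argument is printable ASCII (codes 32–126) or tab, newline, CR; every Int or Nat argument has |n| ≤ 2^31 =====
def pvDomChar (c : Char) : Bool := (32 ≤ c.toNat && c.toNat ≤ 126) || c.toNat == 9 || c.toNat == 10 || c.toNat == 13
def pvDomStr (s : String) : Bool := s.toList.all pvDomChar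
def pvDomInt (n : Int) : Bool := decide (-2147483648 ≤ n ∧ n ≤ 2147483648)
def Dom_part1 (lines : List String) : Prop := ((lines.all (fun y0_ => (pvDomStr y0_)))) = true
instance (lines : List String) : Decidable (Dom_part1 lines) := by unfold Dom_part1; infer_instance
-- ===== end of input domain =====

-- B replaces A's flush-on-blank accumulator by explicit run segmentation: take the leading
-- run of nonempty lines, count its distinct characters, recurse past the blank line (idiomatic).

-- ===== PORT A =====
-- transliteration of A: one fold carrying (groups, answers); blank line flushes answers
def part1 (lines : List String) : Int :=
  let st := lines.foldl
    (fun (st : List (PySem.Set Char) × PySem.Set Char) line =>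
      if PySem.Str.len line > 0 then
        (st.1, line.toList.foldl PySem.Set.add st.2)
      else
        (st.1 ++ [st.2], PySem.Set.empty))
    ([], PySem.Set.empty)
  let groups := st.1 ++ [st.2]
  (groups.map (fun g => PySem.Set.len g)).sum

-- ===== PORT B =====
-- transliteration of Source B: leading run of nonempty lines (the while loop = takeWhile),
-- distinct chars of its concatenation, then recurse on the lines after the blank
def part1_alt (lines : List String) : Int :=
  match lines with
  | [] => 0
  | l :: ls =>
    let run := (l :: ls).takeWhile (fun s => PySem.Str.len s > 0)
    PySem.Set.len (PySem.Set.ofList ((run.map String.toList).flatten)) +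
      part1_alt ((l :: ls).drop (run.length + 1))
termination_by lines.length
decreasing_by
  simp only [List.length_drop, List.length_cons]
  omega

-- ===== PRECONDITION & SPEC =====
def Spec_part1 (lines : List String) (out : Int) : Prop := out = part1_alt lines
instance (lines : List String) (out : Int) : Decidable (Spec_part1 lines out) := by unfold Spec_part1; infer_instance

-- ===== CLAIM (what is proved, stated in full; the proofs are below) =====
def Claim_equal_part1 : Prop := ∀ (lines : List String), Dom_part1 lines → Spec_part1 lines (part1 lines)

-- ===== LEMMAS AND PROOFS =====

-- the remainder of A's run, starting from a pending answers-set `ans`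
def pvRest (ans : PySem.Set Char) (lines : List String) : Int :=
  match lines with
  | [] => PySem.Set.len ans
  | l :: ls =>
    if PySem.Str.len l > 0 then pvRest (ans.update l.toList) ls
    else PySem.Set.len ans + pvRest PySem.Set.empty ls

-- A's fold, summed, equals pvRest
theorem pvA_eq_pvRest (lines : List String) (gs : List (PySem.Set Char)) (ans : PySem.Set Char) :
    (let st := lines.foldl
      (fun (st : List (PySem.Set Char) × PySem.Set Char) line =>
        if PySem.Str.len line > 0 then
          (st.1, line.toList.foldl PySem.Set.add st.2)
        else
          (st.1 ++ [st.2], PySem.Set.empty))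
      (gs, ans)
     ((st.1 ++ [st.2]).map (fun g => PySem.Set.len g)).sum)
    = (gs.map (fun g => PySem.Set.len g)).sum + pvRest ans lines := by
  induction lines generalizing gs ans with
  | nil => simp [pvRest]
  | cons l ls ih =>
    simp only [List.foldl_cons]
    by_cases h : PySem.Str.len l > 0
    · rw [if_pos h]
      rw [ih]
      have : l.toList.foldl PySem.Set.add ans = ans.update l.toList := rfl
      rw [this, pvRest, if_pos h]
    · rw [if_neg h]
      rw [ih]
      rw [pvRest, if_neg h]
      simp
      ring

-- pvRest in terms of B's recursion
theorem pvRest_eq_alt (lines : List String) (ans : PySem.Set Char) :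
    pvRest ans lines
      = PySem.Set.len (ans.update (((lines.takeWhile (fun s => PySem.Str.len s > 0)).map String.toList).flatten))
        + part1_alt (lines.drop ((lines.takeWhile (fun s => PySem.Str.len s > 0)).length + 1)) := by
  induction lines generalizing ans with
  | nil => simp [pvRest, part1_alt, PySem.Set.update]
  | cons l ls ih =>
    by_cases h : PySem.Str.len l > 0
    · rw [pvRest, if_pos h]
      rw [List.takeWhile_cons_of_pos (by simpa using h)]
      rw [ih]
      simp only [List.map_cons, List.flatten_cons, PySem.Set.update_append,
        List.length_cons, List.drop_succ_cons]
    · rw [pvRest, if_neg h]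
      rw [List.takeWhile_cons_of_neg (by simpa using h)]
      simp only [List.map_nil, List.flatten_nil, List.length_nil, Nat.zero_add,
        List.drop_succ_cons, List.drop_zero]
      have hupd : ans.update ([] : List Char) = ans := rfl
      rw [hupd]
      congr 1
      -- part1_alt ls = pvRest ∅ ls : unfold part1_alt one step
      cases ls with
      | nil => simp [pvRest, part1_alt, PySem.Set.len, PySem.Set.empty]
      | cons l' ls' =>
        rw [ih]
        rw [part1_alt]
        have he : (PySem.Set.empty : PySem.Set Char) = [] := rfl
        rw [he, PySem.Set.update_nil_left]

-- ===== VERDICT (by name: the statement is the Claim_ definition above) =====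
theorem part1_spec : Claim_equal_part1 := by
  intro lines _
  unfold Spec_part1 part1
  rw [pvA_eq_pvRest]
  rw [pvRest_eq_alt]
  cases lines with
  | nil => simp [part1_alt, PySem.Set.update, PySem.Set.empty, PySem.Set.len]
  | cons l ls =>
    rw [part1_alt]
    have he : (PySem.Set.empty : PySem.Set Char) = [] := rfl
    rw [he, PySem.Set.update_nil_left]
    simp
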